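-- pv_equiv track=rewrite | github.com/C0dEbReAkEr-glitch/Beep-Encoding | testcase.py | encode_fsk
-- ===== SOURCE A (Python) =====
-- def encode_fsk(text):
--     """Encode text to FSK (Frequency Shift Keying) representation"""
--     # FSK uses two frequencies for 0 and 1
--     freq_0, freq_1 = 1200, 2200  # Common FSK frequencies
--     binary = ''.join(format(ord(char), '08b') for char in text)
--
--     result = []
--     for bit in binary:
--         if bit == '0':
--             result.append(f"{freq_0}Hz")
--         else:
--             result.append(f"{freq_1}Hz")
--
--     return ' '.join(result)
-- ===== SOURCE B (Python) =====
-- def encode_fsk(text):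
--     """Encode text to FSK representation via a precomputed byte->tokens table."""
--     table = [' '.join('2200Hz' if (b >> i) & 1 else '1200Hz' for i in range(7, -1, -1))
--              for b in range(256)]
--     return ' '.join(table[ord(c)] for c in text)
-- ===== Notes on version B (the rewrite author's own statement) =====
-- stated objective: faster
-- what changed: B precomputes a 256-entry byte-to-token-string table (extracting bits by shift/mask) and emits one table lookup per character, instead of flattening the text into one bit string and looping over every bit.
import Mathlib
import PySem

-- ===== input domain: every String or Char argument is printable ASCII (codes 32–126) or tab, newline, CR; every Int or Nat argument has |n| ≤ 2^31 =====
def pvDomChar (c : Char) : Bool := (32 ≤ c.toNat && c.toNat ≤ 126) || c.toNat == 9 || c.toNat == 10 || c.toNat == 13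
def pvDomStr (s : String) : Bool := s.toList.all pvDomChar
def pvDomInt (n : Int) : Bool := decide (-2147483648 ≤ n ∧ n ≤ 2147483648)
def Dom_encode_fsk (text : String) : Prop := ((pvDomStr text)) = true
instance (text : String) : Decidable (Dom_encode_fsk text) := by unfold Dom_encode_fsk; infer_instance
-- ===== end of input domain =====

-- B replaces the per-bit loop over a flattened bit string by a precomputed 256-entry
-- byte-to-token-string table and one lookup per character (objective: alternative).


-- ===== PORT A =====
-- binary digits of a positive n, most significant first (format(n, 'b') core loop;
-- structural on a fuel argument, called with fuel = n, which suffices since n/2 < n)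
def pvBinAux : Nat → Nat → List Char
  | 0, _ => []
  | f+1, n => if n = 0 then [] else
      pvBinAux f (n / 2) ++ [if n % 2 = 1 then '1' else '0']

-- format(n, '08b'): binary string of n, left-padded with '0' to width 8 (exact for n < 256)
def pvBits8 (n : Nat) : List Char :=
  let b := if n = 0 then ['0'] else pvBinAux n n
  List.replicate (8 - b.length) '0' ++ b

def encode_fsk (text : String) : String :=
  let binary := (text.toList.map (fun c => pvBits8 c.toNat)).flatten
  let result := binary.foldl
    (fun acc bit => if bit = '0' then acc ++ ["1200Hz"] else acc ++ ["2200Hz"])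
    ([] : List String)
  PySem.Str.join " " result

-- ===== PORT B =====
-- ' '.join('2200Hz' if (b >> i) & 1 else '1200Hz' for i in range(7, -1, -1))
def pvByteTokens (b : Nat) : String :=
  PySem.Str.join " "
    ((PySem.List.pyRange 7 (-1) (-1)).map
      (fun i => if (b >>> i.toNat) % 2 = 1 then "2200Hz" else "1200Hz"))

def pvFskTable : List String := (List.range 256).map pvByteTokens

def encode_fsk_alt (text : String) : String :=
  PySem.Str.join " " (text.toList.map (fun c => pvFskTable.getD c.toNat ""))

-- ===== PRECONDITION & SPEC =====
def Spec_encode_fsk (text : String) (out : String) : Prop := out = encode_fsk_alt text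
instance (text : String) (out : String) : Decidable (Spec_encode_fsk text out) := by unfold Spec_encode_fsk; infer_instance

-- ===== CLAIM (what is proved, stated in full; the proofs are below) =====
def Claim_equal_encode_fsk : Prop := ∀ (text : String), Dom_encode_fsk text → Spec_encode_fsk text (encode_fsk text)

-- ===== LEMMAS AND PROOFS =====
def pvToken (c : Char) : String := if c = '0' then "1200Hz" else "2200Hz"

theorem pvBinAux_fuel : ∀ n f f', n ≤ f → n ≤ f' → pvBinAux f n = pvBinAux f' n := by
  intro n
  induction n using Nat.strong_induction_on with
  | _ n ih =>
    intro f f' hf hf'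
    match n, f, f' with
    | 0, 0, 0 => rfl
    | 0, 0, b+1 => simp [pvBinAux]
    | 0, a+1, 0 => simp [pvBinAux]
    | 0, a+1, b+1 => simp [pvBinAux]
    | n+1, a+1, b+1 =>
      simp only [pvBinAux, if_neg (Nat.succ_ne_zero n)]
      rw [ih ((n+1)/2) (Nat.div_lt_self (Nat.succ_pos n) (by norm_num)) a b
        (by omega) (by omega)]

theorem pvBin_step (n : Nat) (h : n ≠ 0) :
    pvBinAux n n = pvBinAux (n/2) (n/2) ++ [if n % 2 = 1 then '1' else '0'] := by
  match n, h with
  | m+1, _ =>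
    simp only [pvBinAux, if_neg (Nat.succ_ne_zero m)]
    rw [pvBinAux_fuel ((m+1)/2) m ((m+1)/2) (by omega) le_rfl]

theorem pvL3 : ∀ (k n : Nat), n < 2^k →
    List.replicate (k - (pvBinAux n n).length) '0' ++ pvBinAux n n
      = (List.range k).reverse.map (fun i => if (n >>> i) % 2 = 1 then '1' else '0') := by
  intro k
  induction k with
  | zero =>
    intro n hn
    interval_cases n
    simp [pvBinAux]
  | succ k ih =>
    intro n hn
    rw [List.range_succ_eq_map]
    simp only [List.reverse_cons, List.map_reverse, List.map_append, List.map_map]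
    by_cases h0 : n = 0
    · subst h0
      simp only [pvBinAux, List.length_nil, Nat.sub_zero, List.append_nil]
      simp [Function.comp_def, Nat.zero_shiftRight, List.map_const', List.replicate_succ', List.reverse_replicate]
    · rw [pvBin_step n h0]
      simp only [List.length_append, List.length_cons, List.length_nil]
      have hrec := ih (n/2) (by omega)
      have hshift : ∀ i : Nat, (n >>> (i+1)) = (n/2) >>> i := by
        intro i
        rw [show i+1 = 1+i from Nat.add_comm i 1, Nat.shiftRight_add, Nat.shiftRight_one]
      rw [show (k + 1 - ((pvBinAux (n / 2) (n / 2)).length + (0 + 1))) = k - (pvBinAux (n/2) (n/2)).length from by omega]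
      rw [← List.append_assoc]
      congr 1
      · rw [hrec, List.map_reverse]
        congr 1
        apply List.map_congr_left
        intro i _
        simp [hshift i]

theorem pvBits8_eq (n : Nat) (h : n < 256) :
    pvBits8 n = (List.range 8).reverse.map (fun i => if (n >>> i) % 2 = 1 then '1' else '0') := by
  rw [← pvL3 8 n h]
  unfold pvBits8
  by_cases h0 : n = 0
  · subst h0
    simp [pvBinAux]
  · simp [h0]

theorem pvTokens_eq (n : Nat) (h : n < 256) :
    (pvBits8 n).map pvToken
      = (List.range 8).reverse.map (fun i => if (n >>> i) % 2 = 1 then "2200Hz" else "1200Hz") := by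
  rw [pvBits8_eq n h, List.map_map]
  apply List.map_congr_left
  intro i _
  rcases Nat.mod_two_eq_zero_or_one (n >>> i) with hb | hb <;>
    simp [hb, pvToken]

theorem pvByteTokens_eq (n : Nat) (h : n < 256) :
    pvByteTokens n = PySem.Str.join " " ((pvBits8 n).map pvToken) := by
  unfold pvByteTokens
  rw [pvTokens_eq n h]
  rfl

theorem pvKey (n : Nat) (h : n < 256) :
    pvFskTable.getD n "" = PySem.Str.join " " ((pvBits8 n).map pvToken) := by
  unfold pvFskTable
  rw [List.getD_eq_getElem?_getD, List.getElem?_map, List.getElem?_range h]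
  simpa using pvByteTokens_eq n h

theorem pvFoldl_tokens (l : List Char) (acc : List String) :
    l.foldl (fun acc bit => if bit = '0' then acc ++ ["1200Hz"] else acc ++ ["2200Hz"]) acc
      = acc ++ l.map pvToken := by
  induction l generalizing acc with
  | nil => simp
  | cons c t ih =>
    simp only [List.foldl_cons, List.map_cons, ih, pvToken]
    split <;> simp

theorem pvBinAux_ne_nil (n : Nat) (h : n ≠ 0) : pvBinAux n n ≠ [] := by
  cases n with
  | zero => exact absurd rfl h
  | succ m => unfold pvBinAux; simp

theorem pvBits8_ne_nil (n : Nat) : pvBits8 n ≠ [] := by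
  unfold pvBits8
  split
  · simp
  · intro hc
    exact pvBinAux_ne_nil n (by assumption) (List.append_eq_nil_iff.mp hc).2

theorem pvJoin_append (sep : List Char) (xs ys : List (List Char)) (hx : xs ≠ []) (hy : ys ≠ []) :
    PySem.Chars.join sep (xs ++ ys)
      = PySem.Chars.join sep xs ++ sep ++ PySem.Chars.join sep ys := by
  induction xs with
  | nil => exact absurd rfl hx
  | cons a t ih =>
    cases t with
    | nil =>
      cases ys with
      | nil => exact absurd rfl hy
      | cons b u => simp [PySem.Chars.join_cons_cons, PySem.Chars.join_singleton]
    | cons a' t' =>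
      have h2 := ih (by simp)
      simp only [List.cons_append] at h2 ⊢
      rw [PySem.Chars.join_cons_cons, PySem.Chars.join_cons_cons, h2]
      simp [List.append_assoc]

theorem pvStrJoin_append (xs ys : List String) (hx : xs ≠ []) (hy : ys ≠ []) :
    PySem.Str.join " " (xs ++ ys)
      = PySem.Str.join " " xs ++ " " ++ PySem.Str.join " " ys := by
  apply String.toList_injective
  simp only [String.toList_append, PySem.Str.toList_join, List.map_append]
  exact pvJoin_append _ _ _ (by simpa using hx) (by simpa using hy)

theorem pvMain_list : ∀ (cs : List Char), (∀ c ∈ cs, c.toNat < 256) →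
    PySem.Str.join " " (((cs.map (fun c => pvBits8 c.toNat)).flatten).map pvToken)
      = PySem.Str.join " " (cs.map (fun c => pvFskTable.getD c.toNat "")) := by
  intro cs h
  induction cs with
  | nil => simp
  | cons c t ih =>
    have hc : c.toNat < 256 := h c (List.mem_cons_self ..)
    have ht : ∀ x ∈ t, x.toNat < 256 := fun x hx => h x (List.mem_cons_of_mem _ hx)
    simp only [List.map_cons, List.flatten_cons, List.map_append]
    cases t with
    | nil =>
      simp only [List.map_nil, List.flatten_nil, List.append_nil]
      rw [pvKey c.toNat hc]
      apply String.toList_injective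
      simp [PySem.Str.toList_join, PySem.Chars.join_singleton]
    | cons c' t' =>
      rw [pvStrJoin_append _ _ (by simpa using pvBits8_ne_nil c.toNat)
            (by
              simp only [List.map_cons, List.flatten_cons, List.map_append]
              intro hcontra
              exact pvBits8_ne_nil c'.toNat
                (List.map_eq_nil_iff.mp ((List.append_eq_nil_iff.mp hcontra).1))),
          ih ht, pvKey c.toNat hc]
      apply String.toList_injective
      simp only [String.toList_append, PySem.Str.toList_join, List.map_cons,
        PySem.Chars.join_cons_cons]

-- ===== VERDICT (by name: the statement is the Claim_ definition above) =====
theorem encode_fsk_spec : Claim_equal_encode_fsk := by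
  intro text hdom
  unfold Spec_encode_fsk
  show PySem.Str.join " "
      ((((text.toList.map (fun c => pvBits8 c.toNat)).flatten)).foldl
        (fun acc bit => if bit = '0' then acc ++ ["1200Hz"] else acc ++ ["2200Hz"]) [])
    = encode_fsk_alt text
  rw [pvFoldl_tokens, List.nil_append]
  unfold encode_fsk_alt
  apply pvMain_list
  intro c hc
  have := List.all_eq_true.mp hdom c hc
  simp [pvDomChar] at this
  omega
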